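-- pv_equiv track=rewrite | github.com/qeedquan/challenges | codegolf/exponentiation-sequence.py | f
-- ===== SOURCE A (Python) =====
-- def f(n):
--     p = []
--     for i in range(13):
--         for j in range(i, 11):
--             s = ""
--             for k in range(i, j + 2):
--                 s += str(2**k)
--             p.append(s)
--
--     r = []
--     for x in p:
--         if len(x) == n:
--             r.append(int(x))
--
--     return r
-- ===== SOURCE B (Python) =====
-- def f(n):
--     # Running-accumulator build: for each start i, extend one concatenation
--     # across j instead of rebuilding it from scratch for every (i, j).
--     p = []
--     for i in range(11):
--         s = str(2 ** i)
--         for j in range(i, 11):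
--             s += str(2 ** (j + 1))
--             p.append(s)
--     return [int(x) for x in p if len(x) == n]
-- ===== Notes on version B (the rewrite author's own statement) =====
-- stated objective: simpler
-- what changed: The triple-nested build (rebuilding each concatenation from k=i every time) is replaced by a double loop carrying a running concatenation across j, and the filter loop by a list comprehension.
import Mathlib
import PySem

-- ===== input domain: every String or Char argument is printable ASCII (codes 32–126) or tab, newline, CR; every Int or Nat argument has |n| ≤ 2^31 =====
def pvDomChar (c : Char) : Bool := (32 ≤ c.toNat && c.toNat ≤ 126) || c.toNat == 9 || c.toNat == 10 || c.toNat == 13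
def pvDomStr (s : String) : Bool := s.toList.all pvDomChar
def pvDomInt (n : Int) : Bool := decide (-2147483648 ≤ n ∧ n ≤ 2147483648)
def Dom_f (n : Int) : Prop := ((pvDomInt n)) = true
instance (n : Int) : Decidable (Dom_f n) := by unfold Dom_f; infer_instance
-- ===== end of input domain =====

-- B replaces A's triple-nested rebuild-from-scratch string construction with a double loop
-- carrying a running concatenation, and the filter pass with a comprehension (simpler).

-- ===== PORT A =====
-- the constant list p that A builds (independent of n)
def pA : List String :=
  (PySem.List.pyRange 0 13 1).foldl (fun p i =>
    (PySem.List.pyRange i 11 1).foldl (fun p j =>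
      p ++ [(PySem.List.pyRange i (j + 2) 1).foldl
              (fun s k => s ++ PySem.Int.toStr (2 ^ k.toNat)) ""]) p) []

-- int(x) never raises here: every element of pA is a nonempty digit string, so getD 0 is exact
def f (n : Int) : List Int :=
  pA.foldl (fun r x => if PySem.Str.len x == n then r ++ [(PySem.Int.ofStr? x).getD 0] else r) []

-- ===== PORT B =====
-- the constant list p that B builds with the running accumulator
def pB : List String :=
  (PySem.List.pyRange 0 11 1).foldl (fun p i =>
    ((PySem.List.pyRange i 11 1).foldl
        (fun (ps : List String × String) j =>
          let s := ps.2 ++ PySem.Int.toStr (2 ^ (j + 1).toNat)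
          (ps.1 ++ [s], s))
        (p, PySem.Int.toStr (2 ^ i.toNat))).1) []

def f_alt (n : Int) : List Int :=
  (pB.filter (fun x => PySem.Str.len x == n)).map (fun x => (PySem.Int.ofStr? x).getD 0)

-- ===== PRECONDITION & SPEC =====
def Spec_f (n : Int) (out : List Int) : Prop := out = f_alt n
instance (n : Int) (out : List Int) : Decidable (Spec_f n out) := by unfold Spec_f; infer_instance

-- ===== CLAIM (what is proved, stated in full; the proofs are below) =====
def Claim_equal_f : Prop := ∀ (n : Int), Dom_f n → Spec_f n (f n)

-- ===== LEMMAS AND PROOFS =====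
-- the two constant builds produce the identical list of 66 strings
theorem pA_eq_pB : pA = pB := by decide

-- ===== VERDICT (by name: the statement is the Claim_ definition above) =====
theorem f_spec : Claim_equal_f := by
  intro n _
  unfold Spec_f f f_alt
  rw [PySem.List.foldl_append_if, pA_eq_pB]
  simp
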